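-- pv_equiv track=rewrite | github.com/owenwu811/LeetCodeInPythonTwo | numberofdivisiblesubstrings.py | countDivisibleSubstrings
-- ===== SOURCE A (Python) =====
-- def countDivisibleSubstrings(word: str) -> int:
--     d = {"a": 1, "b": 1, "c": 2, "d": 2, "e": 2, "f": 3, "g": 3, "h": 3, "i": 4, "j": 4, "k": 4, "l": 5, "m": 5, "n": 5, "o": 6, "p": 6, "q": 6, "r": 7, "s": 7, "t": 7, "u": 8, "v": 8, "w": 8, "x": 9, "y": 9, "z": 9}
--     cur = 0
--     res = 0
--     #1 2  3  4
--     #a s  d  f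
--     #1 8 10 13
--
--     #a
--     #a s
--
--     # sd = (10 - 1) = 9, 3 - 1 = 2
--     cur = 0
--     pref = []
--     for i in range(len(word)):
--         cur += d[word[i]]
--         pref.append(cur)
--     res = 0
--     for i in range(len(word)):
--         for j in range(i, len(word)):
--             substr = word[i: j + 1]
--             if i <= 0:
--                 totsum = pref[j]
--             else:
--                 totsum = pref[j] - pref[i - 1]
--             length = j - i + 1
--             if totsum % length == 0:
--                 res += 1
--     return res
-- ===== SOURCE B (Python) =====
-- def countDivisibleSubstrings(word: str) -> int:
--     # Values lie in 1..9, so a substring's sum is divisible by its length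
--     # iff its average is exactly k for a (unique) k in 1..9.  For each k,
--     # substrings with sum == k*length correspond to equal values of the
--     # running total of (value - k); count equal prefixes with a hashmap.
--     res = 0
--     for k in range(1, 10):
--         seen = {0: 1}
--         t = 0
--         for c in word:
--             t += (ord(c) - ord('a') + 4) // 3 - k
--             res += seen.get(t, 0)
--             seen[t] = seen.get(t, 0) + 1
--     return res
-- ===== Notes on version B (the rewrite author's own statement) =====
-- stated objective: faster
-- what changed: B replaces A's quadratic scan over all (i,j) substring pairs by, for each possible average k=1..9 of the letter values, a single pass counting equal values of the running prefix sum of (value - k) with a hashmap, computing letter values by an arithmetic formula instead of a lookup table.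
import Mathlib
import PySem

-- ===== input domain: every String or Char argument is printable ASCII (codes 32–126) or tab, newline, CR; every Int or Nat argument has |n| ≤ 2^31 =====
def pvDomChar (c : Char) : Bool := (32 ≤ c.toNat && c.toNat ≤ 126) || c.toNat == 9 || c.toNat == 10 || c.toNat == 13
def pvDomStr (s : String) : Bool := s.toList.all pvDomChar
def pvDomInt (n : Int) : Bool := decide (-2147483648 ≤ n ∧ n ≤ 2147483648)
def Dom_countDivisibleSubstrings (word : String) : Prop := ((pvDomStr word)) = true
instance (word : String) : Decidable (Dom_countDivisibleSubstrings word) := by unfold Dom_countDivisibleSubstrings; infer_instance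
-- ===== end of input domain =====

-- B replaces A's quadratic scan over all (i, j) pairs by, for each average k = 1..9,
-- a single hashmap pass counting equal values of the running sum of (value - k).

-- ===== PORT A =====
def pyD_countDiv : PySem.Dict Char Int :=
  PySem.Dict.ofList [('a',1),('b',1),('c',2),('d',2),('e',2),('f',3),('g',3),('h',3),
    ('i',4),('j',4),('k',4),('l',5),('m',5),('n',5),('o',6),('p',6),('q',6),
    ('r',7),('s',7),('t',7),('u',8),('v',8),('w',8),('x',9),('y',9),('z',9)]

def countDivisibleSubstrings (word : String) : Int :=
  let w := word.toList
  let st := (PySem.List.pyRange 0 (PySem.Str.len word) 1).foldl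
      (fun (st : Int × List Int) i =>
        let cur := st.1 + pyD_countDiv.getD (PySem.List.pyGetD w i ' ') 0
        (cur, st.2 ++ [cur])) (0, [])
  let pref := st.2
  (PySem.List.pyRange 0 (PySem.Str.len word) 1).foldl
      (fun res i =>
        (PySem.List.pyRange i (PySem.Str.len word) 1).foldl
          (fun res j =>
            let _substr := PySem.List.slice w (some i) (some (j + 1))
            let totsum := if i ≤ 0 then PySem.List.pyGetD pref j 0
                          else PySem.List.pyGetD pref j 0 - PySem.List.pyGetD pref (i - 1) 0
            let length := j - i + 1
            if PySem.Int.mod totsum length = 0 then res + 1 else res) res) 0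

-- ===== PORT B =====
def countDivisibleSubstrings_alt (word : String) : Int :=
  (PySem.List.pyRange 1 10 1).foldl (fun res k =>
    let st := word.toList.foldl
      (fun (st : PySem.Dict Int Int × Int × Int) c =>
        let t := st.2.1 + PySem.Int.floordiv ((c.toNat : Int) - ('a'.toNat : Int) + 4) 3 - k
        let r := st.2.2 + st.1.getD t 0
        (st.1.insert t (st.1.getD t 0 + 1), t, r))
      (PySem.Dict.ofList [((0:Int), (1:Int))], 0, res)
    st.2.2) 0

-- ===== PRECONDITION & SPEC =====
-- Pre_: A's dict lookup d[word[i]] raises KeyError on any character outside the lowercase ASCII letters (codes 97-122);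
-- exactly those inputs are excluded (A returns on all-lowercase strings, including "").
def Pre_countDivisibleSubstrings (word : String) : Prop :=
  word.toList.all (fun c => 97 ≤ c.toNat && c.toNat ≤ 122) = true
instance (word : String) : Decidable (Pre_countDivisibleSubstrings word) := by
  unfold Pre_countDivisibleSubstrings; infer_instance

def pvWitness_countDivisibleSubstrings : String := "asdf"

def Spec_countDivisibleSubstrings (word : String) (out : Int) : Prop := out = countDivisibleSubstrings_alt word
instance (word : String) (out : Int) : Decidable (Spec_countDivisibleSubstrings word out) := by unfold Spec_countDivisibleSubstrings; infer_instance

-- ===== CLAIM (what is proved, stated in full; the proofs are below) =====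
def Claim_equal_countDivisibleSubstrings : Prop := ∀ (word : String), Dom_countDivisibleSubstrings word → Pre_countDivisibleSubstrings word → Spec_countDivisibleSubstrings word (countDivisibleSubstrings word)

-- ===== LEMMAS AND PROOFS =====

def valC (c : Char) : Int := PySem.Int.floordiv ((c.toNat : Int) - ('a'.toNat : Int) + 4) 3

lemma val_dict (c : Char) (hl : 97 ≤ c.toNat) (hr : c.toNat ≤ 122) :
    pyD_countDiv.getD c 0 = valC c ∧ 1 ≤ valC c ∧ valC c ≤ 9 := by
  have hc : c = Char.ofNat c.toNat := (Char.ofNat_toNat c).symm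
  interval_cases h : c.toNat <;> (rw [hc]; decide)

def Sv (w : List Char) (m : Nat) : Int := ((w.take m).map valC).sum

lemma Sv_zero (w : List Char) : Sv w 0 = 0 := rfl

lemma Sv_succ (w : List Char) (m : Nat) (h : m < w.length) :
    Sv w (m+1) = Sv w m + valC w[m] := by
  simp only [Sv, List.take_add_one, List.getElem?_eq_getElem h, Option.toList_some,
    List.map_append, List.sum_append, List.map_cons, List.map_nil, List.sum_cons,
    List.sum_nil, add_zero]

lemma firstLoop (w : List Char) (hPre : ∀ c ∈ w, 97 ≤ c.toNat ∧ c.toNat ≤ 122) :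
    ∀ (n : Nat), n ≤ w.length →
    (PySem.List.pyRange 0 (n:Int) 1).foldl
      (fun (st : Int × List Int) i =>
        (st.1 + pyD_countDiv.getD (PySem.List.pyGetD w i ' ') 0,
         st.2 ++ [st.1 + pyD_countDiv.getD (PySem.List.pyGetD w i ' ') 0]))
      (0, [])
    = (Sv w n, (List.range n).map (fun m => Sv w (m+1))) := by
  intro n
  induction n with
  | zero => intro _; simp [PySem.List.pyRange_one_eq_nil, Sv_zero]
  | succ n ih =>
    intro h
    have hn : n < w.length := by omega
    have hcast : ((n+1 : Nat) : Int) = (n : Int) + 1 := by push_cast; ring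
    rw [hcast, PySem.List.pyRange_one_succ_right (by positivity), List.foldl_append,
      ih (by omega)]
    have hmem : w[n] ∈ w := List.getElem_mem hn
    have hd := (val_dict w[n] (hPre _ hmem).1 (hPre _ hmem).2).1
    simp [PySem.List.pyGetD_natCast, List.getElem?_eq_getElem hn, hd,
      Sv_succ w n hn, List.range_succ]

lemma sum_pyRange (f : Int → Int) (a : Nat) : ∀ (n : Nat), a ≤ n →
    ((PySem.List.pyRange (a:Int) (n:Int) 1).map f).sum = ∑ j ∈ Finset.Ico a n, f j := by
  intro n
  induction n with
  | zero =>
    intro h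
    have ha : a = 0 := by omega
    subst ha
    rw [show ((0:Nat):Int) = 0 by norm_num, PySem.List.pyRange_one_eq_nil (le_refl 0)]
    simp
  | succ n ih =>
    intro h
    rcases Nat.lt_or_ge a (n+1) with h' | h'
    · have ha : a ≤ n := by omega
      have hcast : ((n+1 : Nat) : Int) = (n : Int) + 1 := by push_cast; ring
      rw [hcast, PySem.List.pyRange_one_succ_right (by exact_mod_cast ha), List.map_append,
        List.sum_append, ih ha, Finset.sum_Ico_succ_top ha]
      simp
    · have ha : a = n+1 := by omega
      subst ha
      rw [PySem.List.pyRange_one_eq_nil (le_refl _)]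
      simp

lemma sum_pyRange_zero (f : Int → Int) (n : Nat) :
    ((PySem.List.pyRange 0 (n:Int) 1).map f).sum = ∑ j ∈ Finset.range n, f j := by
  have h := sum_pyRange f 0 n (by omega)
  rw [Finset.range_eq_Ico]
  simpa using h

lemma A_char (word : String) (hPre : ∀ c ∈ word.toList, 97 ≤ c.toNat ∧ c.toNat ≤ 122) :
    countDivisibleSubstrings word =
      ∑ i ∈ Finset.range word.toList.length, ∑ j ∈ Finset.Ico i word.toList.length,
        (if PySem.Int.mod (Sv word.toList (j+1) - Sv word.toList i) ((j:Int) - (i:Int) + 1) = 0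
         then (1:Int) else 0) := by
  unfold countDivisibleSubstrings
  simp only [PySem.Str.len_eq]
  rw [firstLoop word.toList hPre word.toList.length le_rfl]
  set w := word.toList with hw
  set n := w.length with hn
  set pref := (List.range n).map (fun m => Sv w (m+1)) with hpref
  rw [PySem.List.foldl_congr_mem _ _
      (fun res i => res + (((PySem.List.pyRange i (n:Int) 1).countP
        (fun j => decide (PySem.Int.mod
          (if i ≤ 0 then PySem.List.pyGetD pref j 0
           else PySem.List.pyGetD pref j 0 - PySem.List.pyGetD pref (i - 1) 0)
          (j - i + 1) = 0))) : Int)) _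
      (fun acc i _ => PySem.List.foldl_ite_add_one _ _ acc)]
  rw [PySem.List.foldl_add, sum_pyRange_zero, zero_add]
  apply Finset.sum_congr rfl
  intro i hi
  rw [Finset.mem_range] at hi
  rw [← PySem.List.sum_map_ite_one_zero, sum_pyRange (a := i) (n := n) _ (by omega)]
  apply Finset.sum_congr rfl
  intro j hj
  rw [Finset.mem_Ico] at hj
  simp only [decide_eq_true_eq]
  have hj1 : pref.getD j 0 = Sv w (j+1) := PySem.List.getD_map_range _ n j 0 hj.2
  by_cases hi0 : i = 0
  · subst hi0
    simp only [Nat.cast_zero, le_refl, if_pos, PySem.List.pyGetD_natCast, hj1, Sv_zero,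
      Nat.cast_zero, sub_zero]
  · have hipos : (0:Int) < i := by exact_mod_cast Nat.pos_of_ne_zero hi0
    rw [if_neg (show ¬ ((i:Int) ≤ 0) by omega)]
    have hcast : ((i:Int) - 1) = ((i - 1 : Nat) : Int) := by omega
    rw [hcast]
    simp only [PySem.List.pyGetD_natCast, hj1]
    rw [show pref.getD (i-1) 0 = Sv w ((i-1)+1) from PySem.List.getD_map_range _ n (i-1) 0 (by omega),
        show i - 1 + 1 = i by omega]

def Tv (k : Int) (w : List Char) (m : Nat) : Int := Sv w m - k * m

def extraB (k : Int) : List Char → List Int → Int → Int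
  | [], _, _ => 0
  | c :: u, L, t => (L.count (t + valC c - k) : Int) + extraB k u (L ++ [t + valC c - k]) (t + valC c - k)

lemma B_fold (k : Int) : ∀ (u : List Char) (L : List Int) (seen : PySem.Dict Int Int) (t r : Int),
    (∀ x : Int, seen.getD x 0 = (L.count x : Int)) →
    (u.foldl (fun (st : PySem.Dict Int Int × Int × Int) c =>
        (st.1.insert (st.2.1 + PySem.Int.floordiv ((c.toNat : Int) - ('a'.toNat : Int) + 4) 3 - k)
           (st.1.getD (st.2.1 + PySem.Int.floordiv ((c.toNat : Int) - ('a'.toNat : Int) + 4) 3 - k) 0 + 1),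
         st.2.1 + PySem.Int.floordiv ((c.toNat : Int) - ('a'.toNat : Int) + 4) 3 - k,
         st.2.2 + st.1.getD (st.2.1 + PySem.Int.floordiv ((c.toNat : Int) - ('a'.toNat : Int) + 4) 3 - k) 0))
      (seen, t, r)).2.2
    = r + extraB k u L t := by
  intro u
  simp only [show ∀ c : Char, PySem.Int.floordiv ((c.toNat : Int) - ('a'.toNat : Int) + 4) 3 = valC c
    from fun _ => rfl]
  induction u with
  | nil => intro L seen t r _; simp [extraB]
  | cons c u ih =>
    intro L seen t r hseen
    have hseen' : ∀ x : Int, (seen.insert (t + valC c - k) (seen.getD (t + valC c - k) 0 + 1)).getD x 0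
        = ((L ++ [t + valC c - k]).count x : Int) := by
      intro x
      rw [PySem.Dict.getD_insert, List.count_append]
      by_cases hx : x = t + valC c - k
      · subst hx; simp [hseen]
      · simp [hx, hseen, List.count_singleton]
        omega
    simp only [List.foldl_cons]
    rw [ih (L ++ [t + valC c - k]) _ _ _ hseen', extraB, hseen]
    ring

lemma hseen0 : ∀ x : Int, (PySem.Dict.ofList [((0:Int), (1:Int))]).getD x 0 = (([(0:Int)].count x : Nat) : Int) := by
  have hmk : PySem.Dict.ofList [((0:Int), (1:Int))] = PySem.Dict.mk [(0, 1)] := by decide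
  intro x
  by_cases hx : x = 0
  · subst hx; decide
  · have h0x : ¬ ((0:Int) = x) := fun h => hx h.symm
    rw [hmk, PySem.Dict.getD_eq_get?_getD, PySem.Dict.get?_mk_cons]
    simp [beq_iff_eq, h0x, PySem.Dict.get?]

lemma B_char (word : String) :
    countDivisibleSubstrings_alt word
      = ∑ k' ∈ Finset.range 9, extraB ((k':Int)+1) word.toList [0] 0 := by
  unfold countDivisibleSubstrings_alt
  rw [show PySem.List.pyRange 1 10 1 = [1,2,3,4,5,6,7,8,9] from rfl]
  simp only [List.foldl_cons, List.foldl_nil]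
  rw [B_fold 1 _ [0] _ _ _ hseen0, B_fold 2 _ [0] _ _ _ hseen0,
      B_fold 3 _ [0] _ _ _ hseen0, B_fold 4 _ [0] _ _ _ hseen0,
      B_fold 5 _ [0] _ _ _ hseen0, B_fold 6 _ [0] _ _ _ hseen0,
      B_fold 7 _ [0] _ _ _ hseen0, B_fold 8 _ [0] _ _ _ hseen0,
      B_fold 9 _ [0] _ _ _ hseen0]
  simp [Finset.sum_range_succ]

def runT (k : Int) (u : List Char) (t : Int) (q : Nat) : Int :=
  t + ((u.take (q+1)).map (fun c => valC c - k)).sum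

lemma runT_cons (k : Int) (c : Char) (u : List Char) (t : Int) (q : Nat) :
    runT k (c :: u) t (q+1) = runT k u (t + valC c - k) q := by
  simp [runT]; ring

lemma runT_zero_cons (k : Int) (c : Char) (u : List Char) (t : Int) :
    runT k (c :: u) t 0 = t + valC c - k := by
  simp [runT]; ring

lemma extraB_closed (k : Int) : ∀ (u : List Char) (L : List Int) (t : Int),
    extraB k u L t = ∑ q ∈ Finset.range u.length,
      ((L ++ (List.range q).map (runT k u t)).count (runT k u t q) : Int) := by
  intro u
  induction u with
  | nil => intro L t; simp [extraB]
  | cons c u ih =>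
    intro L t
    rw [extraB, ih]
    rw [List.length_cons, Finset.sum_range_succ']
    have hmap : ∀ q : Nat, (List.range (q+1)).map (runT k (c :: u) t)
        = (t + valC c - k) :: (List.range q).map (runT k u (t + valC c - k)) := by
      intro q
      rw [List.range_succ_eq_map, List.map_cons, List.map_map, runT_zero_cons]
      congr 1
      apply List.map_congr_left
      intro p _
      exact runT_cons k c u t p
    have h0 : (L ++ (List.range 0).map (runT k (c :: u) t)).count (runT k (c :: u) t 0)
        = L.count (t + valC c - k) := by
      simp [runT_zero_cons]
    rw [h0, add_comm]
    congr 1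
    apply Finset.sum_congr rfl
    intro q _
    rw [hmap, runT_cons]
    simp

lemma sum_map_sub_const (l : List Char) (k : Int) :
    (l.map (fun c => valC c - k)).sum = (l.map valC).sum - l.length * k := by
  induction l with
  | nil => simp
  | cons c l ih => simp [ih]; ring

lemma runT_eq_Tv (k : Int) (w : List Char) (q : Nat) (h : q < w.length) :
    runT k w 0 q = Tv k w (q+1) := by
  rw [runT, Tv, Sv, sum_map_sub_const]
  rw [List.length_take_of_le (by omega)]
  push_cast
  ring

lemma Tv_zero (k : Int) (w : List Char) : Tv k w 0 = 0 := by simp [Tv, Sv]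

lemma count_map_range (f : Nat → Int) (m : Nat) (x : Int) :
    ((((List.range m).map f).count x : Nat) : Int) = ∑ p ∈ Finset.range m, (if f p = x then (1:Int) else 0) := by
  rw [List.count_eq_countP, List.countP_map,
    ← PySem.List.sum_map_ite_one_zero ((fun y => y == x) ∘ f) (List.range m)]
  have hr : ((List.range m).map (fun p => if ((fun y => y == x) ∘ f) p then (1:Int) else 0)).sum
      = ∑ p ∈ Finset.range m, (if ((fun y => y == x) ∘ f) p then (1:Int) else 0) := rfl
  rw [hr]
  apply Finset.sum_congr rfl
  intro p _
  simp [beq_iff_eq]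

lemma Bk_char (k : Int) (w : List Char) :
    extraB k w [0] 0 = ∑ q ∈ Finset.range w.length, ∑ p ∈ Finset.range (q+1),
      (if Tv k w p = Tv k w (q+1) then (1:Int) else 0) := by
  rw [extraB_closed]
  apply Finset.sum_congr rfl
  intro q hq
  rw [Finset.mem_range] at hq
  have hlist : (([(0:Int)] ++ (List.range q).map (runT k w 0)) : List Int)
      = (List.range (q+1)).map (Tv k w) := by
    rw [List.range_succ_eq_map, List.map_cons, Tv_zero, List.map_map, List.singleton_append]
    congr 1
    apply List.map_congr_left
    intro p hp
    rw [List.mem_range] at hp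
    show runT k w 0 p = Tv k w (p+1)
    exact runT_eq_Tv k w p (by omega)
  rw [hlist, runT_eq_Tv k w q hq, count_map_range]

lemma Sv_bounds (w : List Char) (hPre : ∀ c ∈ w, 97 ≤ c.toNat ∧ c.toNat ≤ 122) (i : Nat) :
    ∀ j : Nat, i ≤ j → j ≤ w.length →
      ((j:Int) - i) ≤ Sv w j - Sv w i ∧ Sv w j - Sv w i ≤ 9*((j:Int) - i) := by
  intro j
  induction j with
  | zero =>
    intro h1 _
    have hi : i = 0 := by omega
    subst hi
    norm_num
  | succ j ih =>
    intro h1 h2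
    rcases Nat.lt_or_ge i (j+1) with h' | h'
    · have hj : j < w.length := by omega
      have hv := (val_dict w[j] (hPre _ (List.getElem_mem hj)).1 (hPre _ (List.getElem_mem hj)).2)
      obtain ⟨ih1, ih2⟩ := ih (by omega) (by omega)
      rw [Sv_succ w j hj]
      push_cast
      constructor <;> linarith [hv.2.1, hv.2.2]
    · have : i = j + 1 := by omega
      subst this
      simp
  -- note: base case i ≤ 0 forces i = 0

lemma Tv_eq_iff (k : Int) (w : List Char) (i j : Nat) :
    (Tv k w i = Tv k w (j+1)) ↔ Sv w (j+1) - Sv w i = k * ((j:Int) - i + 1) := by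
  unfold Tv
  have hr : k * ((j:Int) - i + 1) = k * ((j:Int)+1) - k * i := by ring
  rw [hr]
  push_cast
  constructor <;> intro h <;> linarith

lemma divisible_ite_sum (L X : Int) (h1 : 1 ≤ L) (h2 : L ≤ X) (h3 : X ≤ 9*L) :
    (if PySem.Int.mod X L = 0 then (1:Int) else 0)
      = ∑ k' ∈ Finset.range 9, (if X = ((k':Int)+1) * L then (1:Int) else 0) := by
  have hL : L ≠ 0 := by omega
  by_cases h : L ∣ X
  · obtain ⟨q, hq⟩ := h
    have hq1 : 1 ≤ q := by nlinarith
    have hq9 : q ≤ 9 := by nlinarith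
    rw [if_pos (by rw [PySem.Int.mod_eq_zero_iff_dvd]; exact ⟨q, hq⟩)]
    subst hq
    simp only [Finset.sum_range_succ, Finset.sum_range_zero]
    interval_cases q <;> norm_num [mul_comm L, mul_eq_mul_right_iff, hL]
  · rw [if_neg (by rw [PySem.Int.mod_eq_zero_iff_dvd]; exact h)]
    symm
    apply Finset.sum_eq_zero
    intro k' _
    rw [if_neg]
    intro hEq
    exact h ⟨(k':Int)+1, by rw [hEq]; ring⟩

lemma Ico_eq_filter (i n : Nat) : Finset.Ico i n = (Finset.range n).filter (fun j => i ≤ j) := by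
  ext j; simp [Finset.mem_Ico, Finset.mem_filter, Finset.mem_range]; omega

lemma range_eq_filter (j n : Nat) (h : j < n) :
    Finset.range (j+1) = (Finset.range n).filter (fun i => i ≤ j) := by
  ext i; simp [Finset.mem_filter, Finset.mem_range]; omega

lemma triangle_swap (n : Nat) (g : Nat → Nat → Int) :
    ∑ i ∈ Finset.range n, ∑ j ∈ Finset.Ico i n, g i j
      = ∑ q ∈ Finset.range n, ∑ p ∈ Finset.range (q+1), g p q := by
  have h1 : ∀ i, ∑ j ∈ Finset.Ico i n, g i j
      = ∑ j ∈ Finset.range n, if i ≤ j then g i j else 0 := by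
    intro i; rw [Ico_eq_filter, Finset.sum_filter]
  simp only [h1]
  rw [Finset.sum_comm]
  apply Finset.sum_congr rfl
  intro q hq
  rw [Finset.mem_range] at hq
  rw [range_eq_filter q n hq, Finset.sum_filter]

lemma main_eq (word : String) (hPre : ∀ c ∈ word.toList, 97 ≤ c.toNat ∧ c.toNat ≤ 122) :
    countDivisibleSubstrings word = countDivisibleSubstrings_alt word := by
  rw [A_char word hPre, B_char word]
  set w := word.toList with hw
  have hstep : ∀ i j : Nat, i ≤ j → j < w.length →
      (if PySem.Int.mod (Sv w (j+1) - Sv w i) ((j:Int) - (i:Int) + 1) = 0 then (1:Int) else 0)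
        = ∑ k' ∈ Finset.range 9, (if Tv ((k':Int)+1) w i = Tv ((k':Int)+1) w (j+1) then (1:Int) else 0) := by
    intro i j hij hjn
    have hb := Sv_bounds w hPre i (j+1) (by omega) (by omega)
    have hL : ((j:Int) - i + 1) = ((j+1 : Nat) : Int) - i := by push_cast; ring
    rw [divisible_ite_sum ((j:Int) - (i:Int) + 1) (Sv w (j+1) - Sv w i)
        (by omega) (by rw [hL]; exact hb.1) (by rw [hL]; exact hb.2)]
    apply Finset.sum_congr rfl
    intro k' _
    apply if_congr _ rfl rfl
    rw [Tv_eq_iff]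
  calc ∑ i ∈ Finset.range w.length, ∑ j ∈ Finset.Ico i w.length,
        (if PySem.Int.mod (Sv w (j+1) - Sv w i) ((j:Int) - (i:Int) + 1) = 0 then (1:Int) else 0)
      = ∑ i ∈ Finset.range w.length, ∑ j ∈ Finset.Ico i w.length, ∑ k' ∈ Finset.range 9,
        (if Tv ((k':Int)+1) w i = Tv ((k':Int)+1) w (j+1) then (1:Int) else 0) := by
        apply Finset.sum_congr rfl; intro i hi
        apply Finset.sum_congr rfl; intro j hj
        rw [Finset.mem_range] at hi
        rw [Finset.mem_Ico] at hj
        exact hstep i j hj.1 hj.2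
    _ = ∑ k' ∈ Finset.range 9, ∑ i ∈ Finset.range w.length, ∑ j ∈ Finset.Ico i w.length,
        (if Tv ((k':Int)+1) w i = Tv ((k':Int)+1) w (j+1) then (1:Int) else 0) := by
        rw [Finset.sum_congr rfl (fun i _ => Finset.sum_comm)]
        exact Finset.sum_comm
    _ = ∑ k' ∈ Finset.range 9, extraB ((k':Int)+1) w [0] 0 := by
        apply Finset.sum_congr rfl; intro k' _
        rw [Bk_char, triangle_swap]

-- ===== VERDICT (by name: the statement is the Claim_ definition above) =====
theorem countDivisibleSubstrings_spec : Claim_equal_countDivisibleSubstrings := by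
  intro word _hDom hPre
  exact main_eq word (fun c hc => by simpa using List.all_eq_true.mp hPre c hc)
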